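-- pv_equiv track=rewrite | github.com/selimslab/selimslab.github.io | aside/mini-projects/foobar/lambs.py | solution
-- ===== SOURCE A (Python) =====
-- def solution(total_lambs):
--     # Your code here
--     """
--     max 10**9
--     1. the most junior gets 1
--     2. lambs[i] <= lambs[i-1] *2
--     3. lambs[i] <= lambs[i-1] + lambs[i-2] i>=2
--     and lambs[1]>= lambs[0]
--     4. must hire if possible
--     """
--
--     def get_generous(total_lambs):
--         """
--         get number of henchman you can hire
--
--         go doubling
--         will check 1,2,3
--         1,2,4,8,16..
--
--         """
--         total = 0
--         next_lamb = 1
--         henchman_count = 0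
--
--         while total + next_lamb <= total_lambs:
--             total += next_lamb
--             henchman_count += 1
--             next_lamb *= 2
--
--         return henchman_count
--
--     def get_stingy(total_lambs):
--         """
--         go summing
--
--         1,1,2,3,5,8
--         fibonacci
--         """
--         total = 0
--         a, b = 1, 1
--         henchman_count = 0
--
--         while total + a <= total_lambs:
--             total += a
--             henchman_count += 1
--             a,b = b, a+b
--
--         return henchman_count
--
--     generous = get_generous(total_lambs)
--     stingy = get_stingy(total_lambs)
--
--     return stingy-generous
-- ===== SOURCE B (Python) =====
-- def solution(total_lambs):
--     t = total_lambs if total_lambs > 0 else 0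
--     generous = (t + 1).bit_length() - 1
--     stingy = 0
--     a, b = 1, 2
--     while b - 1 <= total_lambs:
--         stingy += 1
--         a, b = b, a + b
--     return stingy - generous
-- ===== Notes on version B (the rewrite author's own statement) =====
-- stated objective: simpler
-- what changed: The doubling loop for the generous count is replaced by a closed form using int.bit_length on the clamped total, and the stingy loop keeps only the Fibonacci pair (comparing the next Fibonacci number, less one, to the total) instead of a running sum.
import Mathlib
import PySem

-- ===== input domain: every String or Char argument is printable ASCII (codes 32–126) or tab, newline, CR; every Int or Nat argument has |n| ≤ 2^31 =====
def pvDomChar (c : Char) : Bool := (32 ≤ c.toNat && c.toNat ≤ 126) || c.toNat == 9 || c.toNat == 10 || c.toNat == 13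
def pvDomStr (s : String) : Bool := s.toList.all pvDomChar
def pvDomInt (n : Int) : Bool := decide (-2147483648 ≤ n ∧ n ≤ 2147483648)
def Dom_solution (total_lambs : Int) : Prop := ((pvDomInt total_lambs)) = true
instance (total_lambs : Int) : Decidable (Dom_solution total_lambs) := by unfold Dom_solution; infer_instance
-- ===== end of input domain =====

-- B replaces A's doubling loop by a closed form via int.bit_length on the clamped total and keeps
-- only the Fibonacci pair (no running sum) in the stingy loop; objective: simpler.


-- ===== PORT A =====
-- get_generous's while loop; fuel is only a totality guard (100 iterations are far more than
-- needed for any |total_lambs| ≤ 2^31; on fuel exhaustion the current count is returned).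
def genLoopA (fuel : Nat) (L total next count : Int) : Int :=
  match fuel with
  | 0 => count
  | f + 1 =>
    if total + next ≤ L then genLoopA f L (total + next) (next * 2) (count + 1)
    else count

-- get_stingy's while loop (same fuel-as-totality-guard convention)
def stLoopA (fuel : Nat) (L total a b count : Int) : Int :=
  match fuel with
  | 0 => count
  | f + 1 =>
    if total + a ≤ L then stLoopA f L (total + a) b (a + b) (count + 1)
    else count

def solution (total_lambs : Int) : Int :=
  let generous := genLoopA 100 total_lambs 0 1 0
  let stingy := stLoopA 100 total_lambs 0 1 1 0
  stingy - generous

-- ===== PORT B =====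
-- Python's int.bit_length (bits of |n|); Source B only applies it to positive arguments
def pyBitLength (n : Int) : Int :=
  if n = 0 then 0 else (Nat.log2 n.natAbs : Int) + 1

-- Source B's while loop: only the Fibonacci pair (a, b), compared via b - 1 ≤ total
def stLoopB (fuel : Nat) (L a b count : Int) : Int :=
  match fuel with
  | 0 => count
  | f + 1 =>
    if b - 1 ≤ L then stLoopB f L b (a + b) (count + 1)
    else count

def solution_alt (total_lambs : Int) : Int :=
  let t := if total_lambs > 0 then total_lambs else 0
  let generous := pyBitLength (t + 1) - 1
  let stingy := stLoopB 100 total_lambs 1 2 0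
  stingy - generous

-- ===== PRECONDITION & SPEC =====
def Spec_solution (total_lambs : Int) (out : Int) : Prop := out = solution_alt total_lambs
instance (total_lambs : Int) (out : Int) : Decidable (Spec_solution total_lambs out) := by unfold Spec_solution; infer_instance

-- ===== CLAIM (what is proved, stated in full; the proofs are below) =====
def Claim_equal_solution : Prop := ∀ (total_lambs : Int), Dom_solution total_lambs → Spec_solution total_lambs (solution total_lambs)

-- ===== LEMMAS AND PROOFS =====

-- A's doubling loop, started in a state total = next - 1 with next ≥ 1, counts how often the
-- budget L+1 can still be halved against next: it returns count + log2((L+1)/next).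
theorem genLoopA_log2 (fuel : Nat) : ∀ (n c L : Int), 1 ≤ n → L < n * 2 ^ fuel →
    genLoopA fuel L (n - 1) n c = c + (Nat.log2 ((L + 1).toNat / n.toNat) : Int) := by
  induction fuel with
  | zero =>
    intro n c L hn hL
    have hm : (L + 1).toNat / n.toNat < 2 := by
      have : (L + 1).toNat ≤ n.toNat := by omega
      have h2 : (L + 1).toNat / n.toNat ≤ n.toNat / n.toNat := Nat.div_le_div_right this
      have : n.toNat / n.toNat = 1 := Nat.div_self (by omega)
      omega
    simp only [genLoopA]
    rw [Nat.log2_def, if_neg (by omega)]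
    simp
  | succ f ih =>
    intro n c L hn hL
    simp only [genLoopA]
    by_cases h : n - 1 + n ≤ L
    · rw [if_pos h]
      have h2n : n - 1 + n = n * 2 - 1 := by ring_nf
      rw [h2n, ih (n * 2) (c + 1) L (by omega)
        (by rw [show n * 2 * 2 ^ f = n * 2 ^ (f + 1) by rw [pow_succ]; ring]; exact hL)]
      have hmn : 2 * n.toNat ≤ (L + 1).toNat := by omega
      have hn0 : 0 < n.toNat := by omega
      have hge2 : 2 ≤ (L + 1).toNat / n.toNat := (Nat.le_div_iff_mul_le hn0).2 (by omega)
      have hlog : Nat.log2 ((L + 1).toNat / n.toNat)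
          = Nat.log2 ((L + 1).toNat / (n * 2).toNat) + 1 := by
        rw [Nat.log2_def, if_pos hge2, Nat.div_div_eq_div_mul]
        have h2 : (n * 2).toNat = n.toNat * 2 := by omega
        rw [h2]
      rw [hlog]
      push_cast
      ring
    · rw [if_neg h]
      have hm : (L + 1).toNat / n.toNat < 2 := by
        have hlt : (L + 1).toNat < 2 * n.toNat := by omega
        exact Nat.div_lt_of_lt_mul (by omega)
      rw [Nat.log2_def, if_neg (by omega)]
      simp

-- A's stingy loop in a state with total = b - 1 equals B's loop on the shifted pair (b, a + b).
theorem stLoop_eq (fuel : Nat) : ∀ (L a b c : Int), stLoopA fuel L (b - 1) a b c = stLoopB fuel L b (a + b) c := by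
  induction fuel with
  | zero => intro L a b c; simp [stLoopA, stLoopB]
  | succ f ih =>
    intro L a b c
    simp only [stLoopA, stLoopB]
    by_cases h : a + b - 1 ≤ L
    · rw [if_pos (show b - 1 + a ≤ L by omega), if_pos h]
      have hs : b - 1 + a = a + b - 1 := by ring
      rw [hs, ih L b (a + b) (c + 1)]
    · rw [if_neg (show ¬ b - 1 + a ≤ L by omega), if_neg h]

theorem solution_spec : Claim_equal_solution := by
  intro L hDom
  unfold Spec_solution solution solution_alt
  have hbound : -2147483648 ≤ L ∧ L ≤ 2147483648 := by
    unfold Dom_solution pvDomInt at hDom; simpa using hDom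
  have hgen : genLoopA 100 L 0 1 0 = (Nat.log2 (L + 1).toNat : Int) := by
    have := genLoopA_log2 100 1 0 L (le_refl 1) (by norm_num; omega)
    simpa using this
  have hst : stLoopA 100 L 0 1 1 0 = stLoopB 100 L 1 2 0 := by
    have := stLoop_eq 100 L 1 1 0
    norm_num at this
    exact this
  rw [hgen, hst]
  -- B's closed-form generous count equals log2 (L+1)
  by_cases hL : L > 0
  · simp only [if_pos hL]
    unfold pyBitLength
    rw [if_neg (by omega)]
    have : (L + 1).natAbs = (L + 1).toNat := by omega
    rw [this]; ring
  · simp only [if_neg hL]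
    unfold pyBitLength
    rw [if_neg (by omega)]
    have h1 : (L + 1).toNat = 0 ∨ (L + 1).toNat = 1 := by omega
    rcases h1 with h1 | h1 <;> rw [h1] <;> rw [Nat.log2_def] <;> norm_num
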